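-- pv_equiv track=rewrite | github.com/msanders/bio | bio/overlapping.py | overlapping_patterns
-- ===== SOURCE A (Python) =====
-- def overlapping_patterns(patterns: [str]) -> dict:
--     """
--     Input: A collection Patterns of k-mers.
--     Output: The overlap graph Overlap(Patterns), in the form of an
--             adjacency list.
--     """
--     adjacent = {}
--     for i, pattern in enumerate(patterns):
--         suffix = pattern[1:]
--         for j, pattern_prime in enumerate(patterns):
--             if i == j:
--                 continue
--
--             if pattern_prime.startswith(suffix):
--                 if pattern not in adjacent:
--                     adjacent[pattern] = []
--                 adjacent[pattern].append(pattern_prime)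
--
--     return adjacent
-- ===== SOURCE B (Python) =====
-- def overlapping_patterns(patterns: [str]) -> dict:
--     """
--     Input: A collection Patterns of k-mers.
--     Output: The overlap graph Overlap(Patterns), in the form of an
--             adjacency list.
--     """
--     # Index every pattern under each prefix whose length is a suffix length
--     # that actually occurs, so each suffix is answered by one dict lookup.
--     lengths = {len(p[1:]) for p in patterns}
--     index = {}
--     for j, pattern in enumerate(patterns):
--         for l in lengths:
--             if l <= len(pattern):
--                 index.setdefault(pattern[:l], []).append((j, pattern))
--     adjacent = {}
--     for i, pattern in enumerate(patterns):
--         for j, pattern_prime in index.get(pattern[1:], []):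
--             if j != i:
--                 adjacent.setdefault(pattern, []).append(pattern_prime)
--     return adjacent
-- ===== Notes on version B (the rewrite author's own statement) =====
-- stated objective: faster
-- what changed: Replaces A's all-pairs scan (for every pattern, test every other pattern's prefix against its suffix) by a dict built once that indexes every pattern under each occurring prefix length, so each suffix is answered by a single lookup.
import Mathlib
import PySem

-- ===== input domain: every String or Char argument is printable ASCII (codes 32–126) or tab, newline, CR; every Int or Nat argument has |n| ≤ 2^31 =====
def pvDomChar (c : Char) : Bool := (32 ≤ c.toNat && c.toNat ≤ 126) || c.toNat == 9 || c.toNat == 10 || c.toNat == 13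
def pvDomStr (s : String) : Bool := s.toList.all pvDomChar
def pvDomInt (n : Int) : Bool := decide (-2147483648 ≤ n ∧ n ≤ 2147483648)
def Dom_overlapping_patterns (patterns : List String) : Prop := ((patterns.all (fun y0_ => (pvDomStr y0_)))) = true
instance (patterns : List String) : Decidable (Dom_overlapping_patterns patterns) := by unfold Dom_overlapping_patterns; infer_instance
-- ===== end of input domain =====

-- B replaces A's all-pairs scan by a dict indexing every pattern under each relevant prefix,
-- so each suffix is answered by one lookup (objective: faster).

-- ===== PORT A =====
-- literal port: outer loop over enumerate(patterns), inner loop over enumerate(patterns);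
-- 'if pattern not in adjacent: adjacent[pattern] = []' followed by 'adjacent[pattern].append(pp)'
-- (the append on the now-present key is Dict.modify with default []).
def overlapping_patterns (patterns : List String) : List (String × List String) :=
  ((PySem.List.enumerate patterns 0).foldl (fun adjacent ip =>
    let suffix := PySem.Str.slice ip.2 (some 1) none
    (PySem.List.enumerate patterns 0).foldl (fun adjacent jp =>
      if ip.1 == jp.1 then adjacent
      else if PySem.Str.startswith jp.2 suffix then
        (if adjacent.contains ip.2 then adjacent else adjacent.insert ip.2 []).modify ip.2 []
          (fun l => l ++ [jp.2])
      else adjacent) adjacent) (PySem.Dict.empty : PySem.Dict String (List String))).items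

-- ===== PORT B =====
-- literal port of Source B; 'for l in lengths' iterates a Python set, which is exact here because
-- 'index' is only looked up afterwards (no key order reaches the result);
-- 'd.setdefault(k, []).append(x)' is Dict.modify k [] (· ++ [x]).
def overlapping_patterns_alt (patterns : List String) : List (String × List String) :=
  let lengths : PySem.Set Int :=
    PySem.Set.ofList (patterns.map (fun p => PySem.Str.len (PySem.Str.slice p (some 1) none)))
  let index : PySem.Dict String (List (Int × String)) :=
    (PySem.List.enumerate patterns 0).foldl (fun index jp =>
      lengths.foldl (fun index l =>
        if l ≤ PySem.Str.len jp.2 then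
          index.modify (PySem.Str.slice jp.2 none (some l)) [] (fun xs => xs ++ [jp])
        else index) index) PySem.Dict.empty
  ((PySem.List.enumerate patterns 0).foldl (fun adjacent ip =>
    (index.getD (PySem.Str.slice ip.2 (some 1) none) []).foldl (fun adjacent jq =>
      if jq.1 != ip.1 then adjacent.modify ip.2 [] (fun l => l ++ [jq.2])
      else adjacent) adjacent) (PySem.Dict.empty : PySem.Dict String (List String))).items

-- ===== PRECONDITION & SPEC =====
def Spec_overlapping_patterns (patterns : List String) (out : List (String × List String)) : Prop := out = overlapping_patterns_alt patterns
instance (patterns : List String) (out : List (String × List String)) : Decidable (Spec_overlapping_patterns patterns out) := by unfold Spec_overlapping_patterns; infer_instance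

-- ===== CLAIM (what is proved, stated in full; the proofs are below) =====
def Claim_equal_overlapping_patterns : Prop := ∀ (patterns : List String), Dom_overlapping_patterns patterns → Spec_overlapping_patterns patterns (overlapping_patterns patterns)

-- ===== LEMMAS AND PROOFS =====

-- A's conditional key creation followed by the append is exactly one Dict.modify
theorem pv_insert_modify {κ ν : Type} [BEq κ] [LawfulBEq κ] (d : PySem.Dict κ ν) (k : κ)
    (d0 : ν) (f : ν → ν) :
    (if d.contains k then d else d.insert k d0).modify k d0 f = d.modify k d0 f := by
  by_cases h : d.contains k
  · simp [h]
  · simp [h, PySem.Dict.modify, PySem.Dict.getD_insert_self, PySem.Dict.insert_insert_self,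
      PySem.Dict.getD_of_not_contains]

-- a fold that conditionally appends one value under a computed key, as a fold of plain appends
theorem pv_foldl_if_modify {α κ ν : Type} [BEq κ] (l : List α) (c : α → Bool) (k : α → κ)
    (g : α → ν → ν) (d0 : ν) (d : PySem.Dict κ ν) :
    l.foldl (fun d x => if c x then d.modify (k x) d0 (g x) else d) d
      = ((l.filter c).map (fun x => (k x, g x))).foldl
          (fun d q => d.modify q.1 d0 q.2) d := by
  induction l generalizing d with
  | nil => rfl
  | cons x xs ih => cases hc : c x <;> simp [hc, ih]

-- a prefix of p of length l (0 ≤ l ≤ len p) equals s iff s has length l and p starts with s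
theorem pv_slice_eq_iff (p s : String) (l : Int) (hl : 0 ≤ l) (hl2 : l ≤ (p.toList.length : Int)) :
    PySem.Str.slice p none (some l) = s
      ↔ ((s.toList.length : Int) = l ∧ PySem.Str.startswith p s = true) := by
  rw [← String.toList_inj, PySem.Str.toList_slice, PySem.Chars.slice_eq_listSlice,
    PySem.List.slice_to _ hl, PySem.Str.startswith_eq, PySem.Chars.startswith_iff]
  constructor
  · intro h
    have hlen : (List.take l.toNat p.toList).length = s.toList.length := by rw [h]
    rw [List.length_take] at hlen
    exact ⟨by omega, h ▸ List.take_prefix _ _⟩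
  · rintro ⟨hlen, t, ht⟩
    have hln : l.toNat = s.toList.length := by omega
    rw [← ht, hln, List.take_left']
    rfl

-- startswith bounds the length of the prefix
theorem pv_startswith_len {p s : String} (h : PySem.Str.startswith p s = true) :
    s.toList.length ≤ p.toList.length := by
  rw [PySem.Str.startswith_eq, PySem.Chars.startswith_iff] at h
  exact h.length_le

-- effect of the fold over the length set on one key of the index
theorem pv_getD_lenfold (L : List Int) (hL : L.Nodup) (hpos : ∀ l ∈ L, 0 ≤ l)
    (jp : Int × String) (idx : PySem.Dict String (List (Int × String))) (s : String) :
    (L.foldl (fun idx l =>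
        if l ≤ PySem.Str.len jp.2 then
          idx.modify (PySem.Str.slice jp.2 none (some l)) [] (fun xs => xs ++ [jp])
        else idx) idx).getD s []
      = idx.getD s [] ++
        (if ((s.toList.length : Int) ∈ L ∧ PySem.Str.startswith jp.2 s = true) then [jp]
         else []) := by
  induction L generalizing idx with
  | nil => simp
  | cons l L ih =>
    have hnot : l ∉ L := (List.nodup_cons.mp hL).1
    have hl0 : 0 ≤ l := hpos l (List.mem_cons_self ..)
    rw [List.foldl_cons]
    by_cases hle : l ≤ PySem.Str.len jp.2
    · rw [if_pos hle, ih (List.nodup_cons.mp hL).2 (fun x hx => hpos x (List.mem_cons_of_mem _ hx))]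
      rw [PySem.Dict.getD_modify]
      have hle' : l ≤ (jp.2.toList.length : Int) := by rwa [PySem.Str.len_eq] at hle
      by_cases he : s = PySem.Str.slice jp.2 none (some l)
      · have hc := (pv_slice_eq_iff jp.2 s l hl0 hle').mp he.symm
        have h1 : ¬((s.toList.length : Int) ∈ L ∧ PySem.Str.startswith jp.2 s = true) := by
          rintro ⟨hm, _⟩; exact hnot (hc.1 ▸ hm)
        have h2 : (s.toList.length : Int) ∈ l :: L ∧ PySem.Str.startswith jp.2 s = true :=
          ⟨by rw [hc.1]; exact List.mem_cons_self .., hc.2⟩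
        rw [if_pos he, ← he, if_neg h1, if_pos h2]
        simp
      · rw [if_neg he]
        have hne : ¬(((s.toList.length : Int) = l) ∧ PySem.Str.startswith jp.2 s = true) :=
          fun h => he (((pv_slice_eq_iff jp.2 s l hl0 hle').mpr h).symm)
        congr 1
        apply if_congr _ rfl rfl
        rw [List.mem_cons]
        constructor
        · rintro ⟨hm, hsw⟩; exact ⟨Or.inr hm, hsw⟩
        · rintro ⟨hm | hm, hsw⟩
          · exact absurd ⟨hm, hsw⟩ hne
          · exact ⟨hm, hsw⟩
    · rw [if_neg hle, ih (List.nodup_cons.mp hL).2 (fun x hx => hpos x (List.mem_cons_of_mem _ hx))]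
      congr 1
      apply if_congr _ rfl rfl
      rw [List.mem_cons]
      constructor
      · rintro ⟨hm, hsw⟩; exact ⟨Or.inr hm, hsw⟩
      · rintro ⟨hm | hm, hsw⟩
        · exfalso
          have := pv_startswith_len hsw
          rw [PySem.Str.len_eq] at hle
          omega
        · exact ⟨hm, hsw⟩

-- the index lookup for a key whose length is one of the indexed lengths is exactly the
-- enumerated list filtered by startswith
theorem pv_getD_index (E : List (Int × String)) (L : List Int) (hL : L.Nodup)
    (hpos : ∀ l ∈ L, 0 ≤ l) (s : String) (hmem : ((s.toList.length : Int)) ∈ L)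
    (idx : PySem.Dict String (List (Int × String))) :
    (E.foldl (fun idx jp =>
        L.foldl (fun idx l =>
          if l ≤ PySem.Str.len jp.2 then
            idx.modify (PySem.Str.slice jp.2 none (some l)) [] (fun xs => xs ++ [jp])
          else idx) idx) idx).getD s []
      = idx.getD s [] ++ E.filter (fun jp => PySem.Str.startswith jp.2 s) := by
  induction E generalizing idx with
  | nil => simp
  | cons jp E ih =>
    rw [List.foldl_cons, ih, pv_getD_lenfold L hL hpos jp idx s]
    by_cases hsw : PySem.Str.startswith jp.2 s = true
    · rw [if_pos ⟨hmem, hsw⟩, List.filter_cons_of_pos (by simpa using hsw), List.append_assoc]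
      rfl
    · rw [if_neg (fun h => hsw h.2), List.filter_cons_of_neg (by simpa using hsw),
        List.append_nil]

-- ===== VERDICT (by name: the statement is the Claim_ definition above) =====
theorem overlapping_patterns_spec : Claim_equal_overlapping_patterns := by
  intro patterns _
  unfold Spec_overlapping_patterns overlapping_patterns overlapping_patterns_alt
  simp only []
  congr 1
  apply PySem.List.foldl_congr_mem
  intro adj ip hip
  -- A's inner loop as a fold of plain appends
  rw [PySem.List.foldl_congr_mem _ _
    (fun adj jp =>
      if (!(ip.1 == jp.1) && PySem.Str.startswith jp.2 (PySem.Str.slice ip.2 (some 1) none)) then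
        adj.modify ip.2 [] (fun l => l ++ [jp.2])
      else adj) _
    (by
      intro acc jp _
      by_cases h1 : ip.1 == jp.1
      · simp [h1]
      · by_cases h2 : PySem.Str.startswith jp.2 (PySem.Str.slice ip.2 (some 1) none) <;>
          simp [h1, pv_insert_modify])]
  rw [pv_foldl_if_modify, pv_foldl_if_modify]
  congr 1
  rw [pv_getD_index _ _ (PySem.Set.nodup_ofList _)
    (by
      rintro l hl
      rw [PySem.Set.mem_ofList] at hl
      obtain ⟨p, _, rfl⟩ := List.mem_map.mp hl
      rw [PySem.Str.len_eq]
      exact Int.natCast_nonneg _)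
    _
    (by
      rw [PySem.Set.mem_ofList]
      obtain ⟨k, hk, rfl⟩ := (PySem.List.mem_enumerate_iff _ _ _).mp hip
      exact List.mem_map.mpr ⟨patterns[k], by simp, by rw [PySem.Str.len_eq]⟩)]
  rw [PySem.Dict.getD_empty, List.nil_append, List.filter_filter]
  congr 1
  apply List.filter_congr
  intro jp _
  by_cases h : ip.1 = jp.1
  · simp [h]
  · simp [bne, beq_eq_false_iff_ne.mpr h, beq_eq_false_iff_ne.mpr (Ne.symm h)]
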